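-- pv_equiv track=rewrite | github.com/sgbilod/faceless-youtube | src/services/video_assembler/video_assembler.py | _split_script
-- ===== SOURCE A (Python) =====
-- from typing import Callable, List, Optional
--
-- def _split_script(script: str) -> List[str]:
--     """
--     Split script into logical segments for scenes.
--
--     Args:
--         script: Full script text
--
--     Returns:
--         List of script segments
--     """
--     # Split on paragraph breaks or sentences
--     # This is a simple implementation - can be more sophisticated
--
--     # First try paragraph breaks
--     paragraphs = [p.strip() for p in script.split('\n\n') if p.strip()]
--
--     if len(paragraphs) >= 3:
--         return paragraphs
--
--     # Fallback: split on periods (sentences)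
--     sentences = [s.strip() + '.' for s in script.split('.') if s.strip()]
--
--     # Group sentences into segments (3-5 sentences per segment)
--     segments = []
--     current_segment = []
--
--     for sentence in sentences:
--         current_segment.append(sentence)
--
--         if len(current_segment) >= 3:
--             segments.append(' '.join(current_segment))
--             current_segment = []
--
--     # Add remaining sentences
--     if current_segment:
--         segments.append(' '.join(current_segment))
--
--     # Ensure at least 1 segment
--     if not segments:
--         segments = [script]
--
--     return segments
-- ===== SOURCE B (Python) =====
-- from typing import List
--
--
-- def _chunks3(xs: List[str]) -> List[str]:
--     if not xs:
--         return []
--     return [' '.join(xs[:3])] + _chunks3(xs[3:])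
--
--
-- def _split_script(script: str) -> List[str]:
--     paragraphs = [p.strip() for p in script.split('\n\n') if p.strip()]
--     if len(paragraphs) >= 3:
--         return paragraphs
--     sentences = [s.strip() + '.' for s in script.split('.') if s.strip()]
--     segments = _chunks3(sentences)
--     return segments if segments else [script]
-- ===== Notes on version B (the rewrite author's own statement) =====
-- stated objective: simpler
-- what changed: The stateful buffer-append-and-flush-at-3 loop with a trailing-remainder flush is replaced by a direct structural recursion that joins the first three sentences and recurses on the rest; the paragraph early-return and the whole-script fallback are kept.
import Mathlib
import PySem

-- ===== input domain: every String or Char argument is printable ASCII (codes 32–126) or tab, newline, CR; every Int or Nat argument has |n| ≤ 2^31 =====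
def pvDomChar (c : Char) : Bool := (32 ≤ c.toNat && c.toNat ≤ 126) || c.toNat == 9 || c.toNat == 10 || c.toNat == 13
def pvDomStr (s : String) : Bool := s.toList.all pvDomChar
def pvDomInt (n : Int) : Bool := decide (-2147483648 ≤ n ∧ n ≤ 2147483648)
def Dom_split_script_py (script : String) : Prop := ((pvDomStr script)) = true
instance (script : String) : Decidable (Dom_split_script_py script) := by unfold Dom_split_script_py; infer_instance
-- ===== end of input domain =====

-- B replaces A's buffer-append-and-flush-at-3 accumulator loop by a structural recursion in chunks of three (objective: simpler).

-- s.split(sep) for a NONEMPTY literal sep (Python raises only on sep = "", never reached here)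
def pvSplit (s sep : String) : List String := (PySem.Str.split? s sep).getD []

-- ===== PORT A =====
def split_script_py (script : String) : List String :=
  let paragraphs := ((pvSplit script "\n\n").map PySem.Str.strip).filter (fun p => p ≠ "")
  if paragraphs.length ≥ 3 then paragraphs
  else
    let sentences := (((pvSplit script ".").map PySem.Str.strip).filter (fun s => s ≠ "")).map (fun s => s ++ ".")
    let step := sentences.foldl (fun (acc : List String × List String) sentence =>
      let cur := acc.2 ++ [sentence]
      if cur.length ≥ 3 then (acc.1 ++ [PySem.Str.join " " cur], ([] : List String))
      else (acc.1, cur)) (([] : List String), ([] : List String))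
    let segments := if step.2 ≠ [] then step.1 ++ [PySem.Str.join " " step.2] else step.1
    if segments = [] then [script] else segments

-- ===== PORT B =====
def pvChunks3 (l : List String) : List String :=
  match l with
  | [] => []
  | x :: xs => PySem.Str.join " " (x :: xs.take 2) :: pvChunks3 (xs.drop 2)
termination_by l.length
decreasing_by simp

def split_script_py_alt (script : String) : List String :=
  let paragraphs := ((pvSplit script "\n\n").map PySem.Str.strip).filter (fun p => p ≠ "")
  if paragraphs.length ≥ 3 then paragraphs
  else
    let sentences := (((pvSplit script ".").map PySem.Str.strip).filter (fun s => s ≠ "")).map (fun s => s ++ ".")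
    let segments := pvChunks3 sentences
    if segments = [] then [script] else segments

-- ===== PRECONDITION & SPEC =====
def Spec_split_script_py (script : String) (out : List String) : Prop := out = split_script_py_alt script
instance (script : String) (out : List String) : Decidable (Spec_split_script_py script out) := by unfold Spec_split_script_py; infer_instance

-- ===== CLAIM (what is proved, stated in full; the proofs are below) =====
def Claim_equal_split_script_py : Prop := ∀ (script : String), Dom_split_script_py script → Spec_split_script_py script (split_script_py script)

-- ===== LEMMAS AND PROOFS =====

-- A's loop body and remainder flush, named for the invariant lemma
def pvStep (acc : List String × List String) (sentence : String) : List String × List String :=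
  let cur := acc.2 ++ [sentence]
  if cur.length ≥ 3 then (acc.1 ++ [PySem.Str.join " " cur], ([] : List String))
  else (acc.1, cur)

def pvFinish (acc : List String × List String) : List String :=
  if acc.2 ≠ [] then acc.1 ++ [PySem.Str.join " " acc.2] else acc.1

theorem pvChunks3_nil : pvChunks3 [] = [] := by rw [pvChunks3]

theorem pvChunks3_cons (x : String) (xs : List String) :
    pvChunks3 (x :: xs) = PySem.Str.join " " (x :: xs.take 2) :: pvChunks3 (xs.drop 2) := by
  rw [pvChunks3]

-- Loop invariant: with a buffer of at most two sentences, A's buffer-and-flush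
-- loop followed by the remainder flush yields the already-emitted segments
-- followed by B's chunks of (buffer ++ remaining input).
theorem pvLoop_eq (xs : List String) : ∀ (cur segs : List String), cur.length ≤ 2 →
    pvFinish (xs.foldl pvStep (segs, cur)) = segs ++ pvChunks3 (cur ++ xs) := by
  induction xs with
  | nil =>
    intro cur segs h
    match cur, h with
    | [], _ => simp [pvFinish, pvChunks3_nil]
    | [a], _ => simp [pvFinish, pvChunks3_cons, pvChunks3_nil]
    | [a, b], _ => simp [pvFinish, pvChunks3_cons, pvChunks3_nil]
  | cons x xs ih =>
    intro cur segs h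
    match cur, h with
    | [], _ =>
      simp only [List.foldl_cons, pvStep, List.nil_append]
      rw [if_neg (by simp), ih [x] segs (by simp)]
      simp
    | [a], _ =>
      simp only [List.foldl_cons, pvStep]
      rw [if_neg (by simp), ih ([a] ++ [x]) segs (by simp)]
      simp
    | [a, b], _ =>
      simp only [List.foldl_cons, pvStep]
      rw [if_pos (by simp), ih [] (segs ++ [PySem.Str.join " " ([a, b] ++ [x])]) (by simp)]
      simp [pvChunks3_cons]

-- the paragraph and sentence lists both ports build (definitionally equal to theirs)
def pvParagraphs (script : String) : List String :=
  ((pvSplit script "\n\n").map PySem.Str.strip).filter (fun p => p ≠ "")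

def pvSentences (script : String) : List String :=
  (((pvSplit script ".").map PySem.Str.strip).filter (fun s => s ≠ "")).map (fun s => s ++ ".")

-- ===== VERDICT (by name: the statement is the Claim_ definition above) =====
theorem split_script_py_spec : Claim_equal_split_script_py := by
  intro script _
  unfold Spec_split_script_py split_script_py split_script_py_alt
  show (if (pvParagraphs script).length ≥ 3 then pvParagraphs script
      else if pvFinish ((pvSentences script).foldl pvStep ([], [])) = [] then [script]
      else pvFinish ((pvSentences script).foldl pvStep ([], []))) =
    (if (pvParagraphs script).length ≥ 3 then pvParagraphs script
      else if pvChunks3 (pvSentences script) = [] then [script] else pvChunks3 (pvSentences script))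
  rw [pvLoop_eq (pvSentences script) [] [] (by simp)]
  simp only [List.nil_append]
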